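-- pv_equiv track=rewrite | github.com/PaulApivat/python | freecodecamp/scientific_computing/arithmetic_formatter/arithmetic_formatter.py | arithmetic_arranger
-- ===== SOURCE A (Python) =====
-- import operator
--
-- def arithmetic_arranger(problems, solve=False):
--     error = ' '
--     arranged_problems = ""
--     correct_format = True
--     if len(problems) > 5:
--         error = 'Error: Too many problems.'
--         correct_format = False
--         return error
--     else:
--         for item in problems:
--             problem = item.split(' ')
--             wrong_operator = ['x', '/']
--
--             if (not problem[0].isdigit() or not problem[2].isdigit()):
--                 error = "Error: Numbers must only contain digits."
--                 correct_format = False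
--                 return error
--
--             elif any(x in problem for x in wrong_operator):
--                 error = "Error: Operator must be '+' or '-'."
--                 correct_format = False
--                 return error
--
--             elif max(len(problem[0]), len(problem[2])) > 4:
--                 error = "Error: Numbers cannot be more than four digits."
--                 correct_format = False
--                 return error
--             else:
--                 correct_format = True
--
--     if correct_format:
--         #arranged_problems = ""
--         dict = {"+": operator.add, "-": operator.sub}
--         first = [*range(len(problems))]
--         op = [*range(len(problems))]
--         second = [*range(len(problems))]
--         x = 0
--         for prob in problems:
--             first[x], op[x], second[x] = prob.split()
--             x += 1
--         # first line
--         for i in range(len(problems)):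
--             len_first = len(str(int(first[i])))
--             len_second = len(str(int(second[i])))
--             if len_first > len_second:
--                 arranged_problems += str(" " * (len_first -
--                                                 len_first + 2) + first[i] + " "*4)
--             else:
--                 arranged_problems += str(" " * (len_second -
--                                                 len_first + 2) + first[i] + " "*4)
--         arranged_problems = arranged_problems[:-4]
--         arranged_problems += str("\n")
--
--         # second line
--         for i in range(len(problems)):
--             len_first = len(str(int(first[i])))
--             len_second = len(str(int(second[i])))
--             if len_first > len_second:
--                 arranged_problems += str(op[i] + " " * (
--                     len_first - len_second + 1) + second[i] + "    ")
--             else: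
--                 arranged_problems += str(op[i] + " " * (
--                     len_second - len_second + 1) + second[i] + "    ")
--         arranged_problems = arranged_problems[:-4]
--         arranged_problems += str("\n")
--
--         # third line
--         for i in range(len(problems)):
--             len_first = len(str(int(first[i])))
--             len_second = len(str(int(second[i])))
--             if len_first > len_second:
--                 arranged_problems += str("--" + "-" * len_first + "    ")
--             else:
--                 arranged_problems += str("--" + "-" * len_second + "    ")
--         arranged_problems = arranged_problems[:-4]
--         #arranged_problems += str("\n")
--
--         # solve parameter
--         if solve:
--             arranged_problems += str("\n")
--             total = [*range(len(problems))]
--             x = 0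
--             for i in range(len(problems)):
--                 total[x] = dict[op[i]](int(first[i]), int(second[i]))
--                 len_first = len(str(int(first[i])))
--                 len_second = len(str(int(second[i])))
--                 if len_first > len_second:
--                     arranged_problems += str(" " * (len_first -
--                                                     len(str(total[x])) + 2) + str(total[x]) + "    ")
--                 else:
--                     arranged_problems += str(" " * (len_second -
--                                                     len(str(total[x])) + 2) + str(total[x]) + "    ")
--                 x += 1
--             arranged_problems = arranged_problems[:-4]
--
--     return arranged_problems
-- ===== SOURCE B (Python) =====
-- def arithmetic_arranger(problems, solve=False):
--     if len(problems) > 5: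
--         return 'Error: Too many problems.'
--     for item in problems:
--         problem = item.split(' ')
--         if not problem[0].isdigit() or not problem[2].isdigit():
--             return "Error: Numbers must only contain digits."
--         if 'x' in problem or '/' in problem:
--             return "Error: Operator must be '+' or '-'."
--         if max(len(problem[0]), len(problem[2])) > 4:
--             return "Error: Numbers cannot be more than four digits."
--     if not problems:
--         return ""
--     tops, mids, dashes, answers = [], [], [], []
--     for item in problems:
--         parts = item.split()
--         first, op, second = parts[0], parts[1], parts[2]
--         lf = len(str(int(first)))
--         ls = len(str(int(second)))
--         w = max(lf, ls)
--         tops.append(" " * (w - lf + 2) + first)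
--         mids.append(op + " " * (w - ls + 1) + second)
--         dashes.append("--" + "-" * w)
--         if solve:
--             total = int(first) + int(second) if op == "+" else int(first) - int(second)
--             answers.append(" " * (w - len(str(total)) + 2) + str(total))
--     lines = ["    ".join(tops), "    ".join(mids), "    ".join(dashes)]
--     if solve:
--         lines.append("    ".join(answers))
--     return "\n".join(lines)
-- ===== Notes on version B (the rewrite author's own statement) =====
-- stated objective: simpler
-- what changed: Replaced A's three/four separate per-line index loops that append to one big string with a trailing 4-space separator stripped by [:-4] (plus the range-list scaffolding and flag variable) by one pass per problem collecting four column lists joined with ' ' and ' '; the branch-on-len_first>len_second padding collapses into a single max-width formula and the operator dict into a conditional.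
import Mathlib
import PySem

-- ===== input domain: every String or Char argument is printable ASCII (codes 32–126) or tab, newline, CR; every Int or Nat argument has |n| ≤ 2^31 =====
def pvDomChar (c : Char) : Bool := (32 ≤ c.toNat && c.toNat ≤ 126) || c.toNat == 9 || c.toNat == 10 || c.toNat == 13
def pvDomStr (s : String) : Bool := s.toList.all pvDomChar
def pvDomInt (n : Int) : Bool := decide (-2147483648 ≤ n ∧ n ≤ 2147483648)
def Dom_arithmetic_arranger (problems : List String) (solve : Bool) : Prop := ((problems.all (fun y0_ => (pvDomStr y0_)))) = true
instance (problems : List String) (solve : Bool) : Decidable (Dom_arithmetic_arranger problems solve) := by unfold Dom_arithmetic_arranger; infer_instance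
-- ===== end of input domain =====

-- B is a simpler re-decomposition of A: the same validation, then ONE pass building four column
-- lists (top, mid, dashes, answers) that are joined with '    ' and '\n', instead of A's four
-- separate index loops each appending a trailing 4-space separator to one big string and
-- stripping it with [:-4].

-- ===== PORT A =====

-- ' ' * n  (Python: negative n gives '')
def aSpaces (n : Int) : List Char := PySem.List.pyRepeat [' '] n

-- the validation loop: returns the first error message, none if every item passes
-- (problem[0] is safe in Python since split(' ') is never empty; problem[2] raises IndexError
-- when missing and problem[0] is a digit string — those inputs are outside Pre_)
def aCheck : List (List Char) → Option (List Char)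
  | [] => none
  | item :: rest =>
    let problem := PySem.Chars.splitOn item [' ']
    let p0 := (PySem.List.pyGet? problem 0).getD []
    let p2 := (PySem.List.pyGet? problem 2).getD []
    if !(PySem.Chars.strIsdigit p0) || !(PySem.Chars.strIsdigit p2) then
      some "Error: Numbers must only contain digits.".toList
    else if [['x'], ['/']].any (fun x => problem.contains x) then
      some "Error: Operator must be '+' or '-'.".toList
    else if max p0.length p2.length > 4 then
      some "Error: Numbers cannot be more than four digits.".toList
    else aCheck rest

-- the unpack loop 'first[x], op[x], second[x] = prob.split()' (unpack of a non-3-list raises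
-- ValueError in Python — outside Pre_)
def aParse (probs : List (List Char)) : List (List Char × List Char × List Char) :=
  probs.map (fun s =>
    let w := PySem.Chars.split₀ s
    ((PySem.List.pyGet? w 0).getD [], (PySem.List.pyGet? w 1).getD [], (PySem.List.pyGet? w 2).getD []))

def aLenInt (cs : List Char) : Nat := (PySem.Int.toChars ((PySem.Int.ofChars? cs).getD 0)).length

-- dict = {"+": operator.add, "-": operator.sub}; a missing key raises KeyError (outside Pre_)
def aOpDict : PySem.Dict (List Char) (Int → Int → Int) :=
  (PySem.Dict.empty.insert ['+'] (· + ·)).insert ['-'] (· - ·)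

def aArrange (probs : List (List Char)) (solve : Bool) : List Char :=
  let ps := aParse probs
  -- first line
  let a1 := ps.foldl (fun acc t =>
    let lf := aLenInt t.1
    let ls := aLenInt t.2.2
    if lf > ls then acc ++ (aSpaces ((lf : Int) - lf + 2) ++ t.1 ++ aSpaces 4)
    else acc ++ (aSpaces ((ls : Int) - lf + 2) ++ t.1 ++ aSpaces 4)) []
  let a1 := PySem.List.slice a1 none (some (-4)) ++ ['\n']
  -- second line
  let a2 := ps.foldl (fun acc t =>
    let lf := aLenInt t.1
    let ls := aLenInt t.2.2
    if lf > ls then acc ++ (t.2.1 ++ aSpaces ((lf : Int) - ls + 1) ++ t.2.2 ++ aSpaces 4)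
    else acc ++ (t.2.1 ++ aSpaces ((ls : Int) - ls + 1) ++ t.2.2 ++ aSpaces 4)) a1
  let a2 := PySem.List.slice a2 none (some (-4)) ++ ['\n']
  -- third line
  let a3 := ps.foldl (fun acc t =>
    let lf := aLenInt t.1
    let ls := aLenInt t.2.2
    if lf > ls then acc ++ ("--".toList ++ PySem.List.pyRepeat ['-'] (lf : Int) ++ aSpaces 4)
    else acc ++ ("--".toList ++ PySem.List.pyRepeat ['-'] (ls : Int) ++ aSpaces 4)) a2
  let a3 := PySem.List.slice a3 none (some (-4))
  -- solve parameter
  if solve then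
    let a4 := ps.foldl (fun acc t =>
      let total := ((aOpDict.get? t.2.1).getD (fun _ _ => 0)) ((PySem.Int.ofChars? t.1).getD 0) ((PySem.Int.ofChars? t.2.2).getD 0)
      let lf := aLenInt t.1
      let ls := aLenInt t.2.2
      if lf > ls then acc ++ (aSpaces ((lf : Int) - (PySem.Int.toChars total).length + 2) ++ PySem.Int.toChars total ++ aSpaces 4)
      else acc ++ (aSpaces ((ls : Int) - (PySem.Int.toChars total).length + 2) ++ PySem.Int.toChars total ++ aSpaces 4)) (a3 ++ ['\n'])
    PySem.List.slice a4 none (some (-4))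
  else a3

def arithmetic_arranger (problems : List String) (solve : Bool) : String :=
  if problems.length > 5 then "Error: Too many problems."
  else
    match aCheck (problems.map String.toList) with
    | some e => String.ofList e
    | none => String.ofList (aArrange (problems.map String.toList) solve)

-- ===== PORT B =====

def bSpaces (n : Int) : List Char := PySem.List.pyRepeat [' '] n

-- B's validation loop (early returns, no flag variable)
def bValidate : List (List Char) → Option (List Char)
  | [] => none
  | item :: rest =>
    let problem := PySem.Chars.splitOn item [' ']
    let p0 := (PySem.List.pyGet? problem 0).getD []
    let p2 := (PySem.List.pyGet? problem 2).getD []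
    if !(PySem.Chars.strIsdigit p0) || !(PySem.Chars.strIsdigit p2) then
      some "Error: Numbers must only contain digits.".toList
    else if problem.contains ['x'] || problem.contains ['/'] then
      some "Error: Operator must be '+' or '-'.".toList
    else if max p0.length p2.length > 4 then
      some "Error: Numbers cannot be more than four digits.".toList
    else bValidate rest

-- the single column-building pass: accumulates (tops, mids, dashes, answers)
def bCols (items : List (List Char)) (solve : Bool) :
    List (List Char) × List (List Char) × List (List Char) × List (List Char) :=
  items.foldl (fun acc item =>
    let parts := PySem.Chars.split₀ item
    let first := (PySem.List.pyGet? parts 0).getD []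
    let op := (PySem.List.pyGet? parts 1).getD []
    let second := (PySem.List.pyGet? parts 2).getD []
    let lf := (PySem.Int.toChars ((PySem.Int.ofChars? first).getD 0)).length
    let ls := (PySem.Int.toChars ((PySem.Int.ofChars? second).getD 0)).length
    let w := max lf ls
    let tops := acc.1 ++ [bSpaces ((w : Int) - lf + 2) ++ first]
    let mids := acc.2.1 ++ [op ++ bSpaces ((w : Int) - ls + 1) ++ second]
    let dashes := acc.2.2.1 ++ ["--".toList ++ PySem.List.pyRepeat ['-'] (w : Int)]
    let answers :=
      if solve then
        let total := if op == ['+'] then ((PySem.Int.ofChars? first).getD 0) + ((PySem.Int.ofChars? second).getD 0)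
                     else ((PySem.Int.ofChars? first).getD 0) - ((PySem.Int.ofChars? second).getD 0)
        acc.2.2.2 ++ [bSpaces ((w : Int) - (PySem.Int.toChars total).length + 2) ++ PySem.Int.toChars total]
      else acc.2.2.2
    (tops, mids, dashes, answers)) ([], [], [], [])

def arithmetic_arranger_alt (problems : List String) (solve : Bool) : String :=
  if problems.length > 5 then "Error: Too many problems."
  else
    match bValidate (problems.map String.toList) with
    | some e => String.ofList e
    | none =>
      if problems.isEmpty then ""
      else
        let (tops, mids, dashes, answers) := bCols (problems.map String.toList) solve
        let sep := "    ".toList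
        let lines := [PySem.Chars.join sep tops, PySem.Chars.join sep mids, PySem.Chars.join sep dashes]
          ++ (if solve then [PySem.Chars.join sep answers] else [])
        String.ofList (PySem.Chars.join ['\n'] lines)

-- ===== PRECONDITION & SPEC =====

def pvItemValid (cs : List Char) : Bool :=
  let p := PySem.Chars.splitOn cs [' ']
  let p0 := (PySem.List.pyGet? p 0).getD []
  let p2 := (PySem.List.pyGet? p 2).getD []
  PySem.Chars.strIsdigit p0 && PySem.Chars.strIsdigit p2 &&
    !(p.contains ['x']) && !(p.contains ['/']) && max p0.length p2.length ≤ 4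

def pvItemCrash (cs : List Char) : Bool :=
  let p := PySem.Chars.splitOn cs [' ']
  PySem.Chars.strIsdigit ((PySem.List.pyGet? p 0).getD []) && p.length < 3

def pvItemFmtOk (cs : List Char) (solve : Bool) : Bool :=
  let w := PySem.Chars.split₀ cs
  w.length == 3 && PySem.Chars.strIsdigit ((PySem.List.pyGet? w 0).getD []) &&
    PySem.Chars.strIsdigit ((PySem.List.pyGet? w 2).getD []) &&
    (!solve || (PySem.List.pyGet? w 1).getD [] == ['+'] || (PySem.List.pyGet? w 1).getD [] == ['-'])

-- Pre_ excludes exactly the inputs where A raises: an IndexError when the first failing item's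
-- split(' ') has a digit head but fewer than 3 parts; and, once every item validates, a
-- ValueError/KeyError when some item's whitespace split is not three parts with digit operands
-- (or, under solve, its operator is not '+'/'-').
def pvPreB (L : List (List Char)) (solve : Bool) : Bool :=
  match L.dropWhile pvItemValid with
  | [] => L.all (fun cs => pvItemFmtOk cs solve)
  | h :: _ => !pvItemCrash h
def Pre_arithmetic_arranger (problems : List String) (solve : Bool) : Prop :=
  problems.length > 5 ∨ pvPreB (problems.map String.toList) solve = true
instance (problems : List String) (solve : Bool) : Decidable (Pre_arithmetic_arranger problems solve) := by
  unfold Pre_arithmetic_arranger; infer_instance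

def pvWitness_arithmetic_arranger : List String × Bool := (["007 + 2", "99 - 1000"], true)

def Spec_arithmetic_arranger (problems : List String) (solve : Bool) (out : String) : Prop := out = arithmetic_arranger_alt problems solve
instance (problems : List String) (solve : Bool) (out : String) : Decidable (Spec_arithmetic_arranger problems solve out) := by unfold Spec_arithmetic_arranger; infer_instance

-- ===== CLAIM (what is proved, stated in full; the proofs are below) =====
def Claim_equal_arithmetic_arranger : Prop := ∀ (problems : List String) (solve : Bool), Dom_arithmetic_arranger problems solve → Pre_arithmetic_arranger problems solve → Spec_arithmetic_arranger problems solve (arithmetic_arranger problems solve)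

-- ===== LEMMAS AND PROOFS =====

-- proof-side abbreviations
def pvSep : List Char := aSpaces 4

def pOne (cs : List Char) : List Char × List Char × List Char :=
  let w := PySem.Chars.split₀ cs
  ((PySem.List.pyGet? w 0).getD [], (PySem.List.pyGet? w 1).getD [], (PySem.List.pyGet? w 2).getD [])

def lenI (cs : List Char) : Nat := (PySem.Int.toChars ((PySem.Int.ofChars? cs).getD 0)).length

def cTop (t : List Char × List Char × List Char) : List Char :=
  bSpaces ((max (lenI t.1) (lenI t.2.2) : Int) - lenI t.1 + 2) ++ t.1

def cMid (t : List Char × List Char × List Char) : List Char :=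
  t.2.1 ++ bSpaces ((max (lenI t.1) (lenI t.2.2) : Int) - lenI t.2.2 + 1) ++ t.2.2

def cDash (t : List Char × List Char × List Char) : List Char :=
  "--".toList ++ PySem.List.pyRepeat ['-'] ((max (lenI t.1) (lenI t.2.2)) : Int)

def cAnsB (t : List Char × List Char × List Char) : List Char :=
  let total := if t.2.1 == ['+'] then ((PySem.Int.ofChars? t.1).getD 0) + ((PySem.Int.ofChars? t.2.2).getD 0)
    else ((PySem.Int.ofChars? t.1).getD 0) - ((PySem.Int.ofChars? t.2.2).getD 0)
  bSpaces ((max (lenI t.1) (lenI t.2.2) : Int) - (PySem.Int.toChars total).length + 2) ++ PySem.Int.toChars total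

def cAnsA (t : List Char × List Char × List Char) : List Char :=
  let total := ((aOpDict.get? t.2.1).getD (fun _ _ => 0)) ((PySem.Int.ofChars? t.1).getD 0) ((PySem.Int.ofChars? t.2.2).getD 0)
  bSpaces ((max (lenI t.1) (lenI t.2.2) : Int) - (PySem.Int.toChars total).length + 2) ++ PySem.Int.toChars total

theorem aSpaces_eq_bSpaces : aSpaces = bSpaces := rfl

theorem pvSep_length : pvSep.length = 4 := by
  simp [pvSep, aSpaces, PySem.List.pyRepeat_singleton]

theorem aParse_eq (L : List (List Char)) : aParse L = L.map pOne := rfl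

theorem slice_drop4 (l r : List Char) (hr : r.length = 4) :
    PySem.List.slice (l ++ r) none (some (-4)) = l := by
  simp [PySem.List.slice, PySem.List.clampIdx, hr]

theorem slice_one (y : List Char) :
    PySem.List.slice (y ++ pvSep) none (some (-4)) = y :=
  slice_drop4 _ _ pvSep_length

theorem slice_pair (x y : List Char) :
    PySem.List.slice (x ++ (y ++ pvSep)) none (some (-4)) = x ++ y := by
  rw [← List.append_assoc]
  exact slice_drop4 _ _ pvSep_length

theorem flatMap_join (g : (List Char × List Char × List Char) → List Char)
    (ps : List (List Char × List Char × List Char)) (h : ps ≠ []) :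
    ps.flatMap (fun t => g t ++ pvSep) = PySem.Chars.join pvSep (ps.map g) ++ pvSep := by
  induction ps with
  | nil => simp at h
  | cons a t ih =>
    cases t with
    | nil => simp [PySem.Chars.join_singleton]
    | cons b u =>
      rw [List.flatMap_cons, ih (by simp)]
      simp only [List.map_cons, PySem.Chars.join_cons_cons]
      simp [List.append_assoc]

theorem bValidate_none_iff (L : List (List Char)) :
    bValidate L = none ↔ ∀ cs ∈ L, pvItemValid cs = true := by
  induction L with
  | nil => simp [bValidate]
  | cons h t ih =>
    simp only [bValidate]
    split_ifs with h1 h2 h3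
    · refine iff_of_false (by simp) (fun hall => ?_)
      have hv := hall h (by simp)
      simp [pvItemValid] at hv
      simp at h1
      rcases h1 with h1 | h1 <;> simp [h1] at hv
    · refine iff_of_false (by simp) (fun hall => ?_)
      have hv := hall h (by simp)
      simp [pvItemValid] at hv
      simp at h2
      tauto
    · refine iff_of_false (by simp) (fun hall => ?_)
      have hv := hall h (by simp)
      simp [pvItemValid] at hv
      simp at h3
      rcases h3 with h3 | h3 <;> omega
    · rw [ih]
      constructor
      · intro hall cs hcs
        rcases List.mem_cons.1 hcs with rfl | hcs'
        · simp at h1 h2 h3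
          simp [pvItemValid]
          tauto
        · exact hall cs hcs'
      · intro hall cs hcs
        exact hall cs (List.mem_cons_of_mem _ hcs)

theorem aCheck_eq_bValidate (L : List (List Char)) : aCheck L = bValidate L := by
  induction L with
  | nil => rfl
  | cons h t ih =>
    simp only [aCheck, bValidate, List.any, List.contains_eq_mem]
    split_ifs with h1 h2 h3 h4 h5 <;> simp_all

-- the first line's loop body, rewritten as 'acc ++ column ++ separator'
theorem aLine1_eq (ps : List (List Char × List Char × List Char)) (init : List Char) :
    ps.foldl (fun acc t =>
      let lf := aLenInt t.1
      let ls := aLenInt t.2.2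
      if lf > ls then acc ++ (aSpaces ((lf : Int) - lf + 2) ++ t.1 ++ aSpaces 4)
      else acc ++ (aSpaces ((ls : Int) - lf + 2) ++ t.1 ++ aSpaces 4)) init
    = init ++ ps.flatMap (fun t => cTop t ++ pvSep) := by
  rw [show (fun (acc : List Char) t =>
      let lf := aLenInt t.1
      let ls := aLenInt t.2.2
      if lf > ls then acc ++ (aSpaces ((lf : Int) - lf + 2) ++ t.1 ++ aSpaces 4)
      else acc ++ (aSpaces ((ls : Int) - lf + 2) ++ t.1 ++ aSpaces 4))
    = fun acc t => acc ++ (cTop t ++ pvSep) from ?_, PySem.List.foldl_append_eq_flatMap]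
  funext acc t
  simp only [cTop, pvSep, aSpaces_eq_bSpaces, aLenInt, lenI, List.append_assoc]
  split_ifs with h
  · rw [max_eq_left (by exact_mod_cast Nat.le_of_lt h)]
  · rw [max_eq_right (by exact_mod_cast Nat.le_of_not_lt h)]

theorem aLine2_eq (ps : List (List Char × List Char × List Char)) (init : List Char) :
    ps.foldl (fun acc t =>
      let lf := aLenInt t.1
      let ls := aLenInt t.2.2
      if lf > ls then acc ++ (t.2.1 ++ aSpaces ((lf : Int) - ls + 1) ++ t.2.2 ++ aSpaces 4)
      else acc ++ (t.2.1 ++ aSpaces ((ls : Int) - ls + 1) ++ t.2.2 ++ aSpaces 4)) init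
    = init ++ ps.flatMap (fun t => cMid t ++ pvSep) := by
  rw [show (fun (acc : List Char) t =>
      let lf := aLenInt t.1
      let ls := aLenInt t.2.2
      if lf > ls then acc ++ (t.2.1 ++ aSpaces ((lf : Int) - ls + 1) ++ t.2.2 ++ aSpaces 4)
      else acc ++ (t.2.1 ++ aSpaces ((ls : Int) - ls + 1) ++ t.2.2 ++ aSpaces 4))
    = fun acc t => acc ++ (cMid t ++ pvSep) from ?_, PySem.List.foldl_append_eq_flatMap]
  funext acc t
  simp only [cMid, pvSep, aSpaces_eq_bSpaces, aLenInt, lenI, List.append_assoc]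
  split_ifs with h
  · rw [max_eq_left (by exact_mod_cast Nat.le_of_lt h)]
  · rw [max_eq_right (by exact_mod_cast Nat.le_of_not_lt h)]

theorem aLine3_eq (ps : List (List Char × List Char × List Char)) (init : List Char) :
    ps.foldl (fun acc t =>
      let lf := aLenInt t.1
      let ls := aLenInt t.2.2
      if lf > ls then acc ++ ("--".toList ++ PySem.List.pyRepeat ['-'] (lf : Int) ++ aSpaces 4)
      else acc ++ ("--".toList ++ PySem.List.pyRepeat ['-'] (ls : Int) ++ aSpaces 4)) init
    = init ++ ps.flatMap (fun t => cDash t ++ pvSep) := by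
  rw [show (fun (acc : List Char) t =>
      let lf := aLenInt t.1
      let ls := aLenInt t.2.2
      if lf > ls then acc ++ ("--".toList ++ PySem.List.pyRepeat ['-'] (lf : Int) ++ aSpaces 4)
      else acc ++ ("--".toList ++ PySem.List.pyRepeat ['-'] (ls : Int) ++ aSpaces 4))
    = fun acc t => acc ++ (cDash t ++ pvSep) from ?_, PySem.List.foldl_append_eq_flatMap]
  funext acc t
  simp only [cDash, pvSep, aLenInt, lenI, List.append_assoc]
  split_ifs with h
  · rw [max_eq_left (by exact_mod_cast Nat.le_of_lt h)]
  · rw [max_eq_right (by exact_mod_cast Nat.le_of_not_lt h)]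

theorem aLine4_eq (ps : List (List Char × List Char × List Char)) (init : List Char) :
    ps.foldl (fun acc t =>
      let total := ((aOpDict.get? t.2.1).getD (fun _ _ => 0)) ((PySem.Int.ofChars? t.1).getD 0) ((PySem.Int.ofChars? t.2.2).getD 0)
      let lf := aLenInt t.1
      let ls := aLenInt t.2.2
      if lf > ls then acc ++ (aSpaces ((lf : Int) - (PySem.Int.toChars total).length + 2) ++ PySem.Int.toChars total ++ aSpaces 4)
      else acc ++ (aSpaces ((ls : Int) - (PySem.Int.toChars total).length + 2) ++ PySem.Int.toChars total ++ aSpaces 4)) init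
    = init ++ ps.flatMap (fun t => cAnsA t ++ pvSep) := by
  rw [show (fun (acc : List Char) t =>
      let total := ((aOpDict.get? t.2.1).getD (fun _ _ => 0)) ((PySem.Int.ofChars? t.1).getD 0) ((PySem.Int.ofChars? t.2.2).getD 0)
      let lf := aLenInt t.1
      let ls := aLenInt t.2.2
      if lf > ls then acc ++ (aSpaces ((lf : Int) - (PySem.Int.toChars total).length + 2) ++ PySem.Int.toChars total ++ aSpaces 4)
      else acc ++ (aSpaces ((ls : Int) - (PySem.Int.toChars total).length + 2) ++ PySem.Int.toChars total ++ aSpaces 4))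
    = fun acc t => acc ++ (cAnsA t ++ pvSep) from ?_, PySem.List.foldl_append_eq_flatMap]
  funext acc t
  simp only [cAnsA, pvSep, aSpaces_eq_bSpaces, aLenInt, lenI, List.append_assoc]
  split_ifs with h
  · rw [max_eq_left (by exact_mod_cast Nat.le_of_lt h)]
  · rw [max_eq_right (by exact_mod_cast Nat.le_of_not_lt h)]

-- B's single pass produces the four mapped column lists
theorem bCols_go (solve : Bool) (L : List (List Char))
    (acc : List (List Char) × List (List Char) × List (List Char) × List (List Char)) :
    L.foldl (fun acc item =>
      let parts := PySem.Chars.split₀ item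
      let first := (PySem.List.pyGet? parts 0).getD []
      let op := (PySem.List.pyGet? parts 1).getD []
      let second := (PySem.List.pyGet? parts 2).getD []
      let lf := (PySem.Int.toChars ((PySem.Int.ofChars? first).getD 0)).length
      let ls := (PySem.Int.toChars ((PySem.Int.ofChars? second).getD 0)).length
      let w := max lf ls
      let tops := acc.1 ++ [bSpaces ((w : Int) - lf + 2) ++ first]
      let mids := acc.2.1 ++ [op ++ bSpaces ((w : Int) - ls + 1) ++ second]
      let dashes := acc.2.2.1 ++ ["--".toList ++ PySem.List.pyRepeat ['-'] (w : Int)]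
      let answers :=
        if solve then
          let total := if op == ['+'] then ((PySem.Int.ofChars? first).getD 0) + ((PySem.Int.ofChars? second).getD 0)
                       else ((PySem.Int.ofChars? first).getD 0) - ((PySem.Int.ofChars? second).getD 0)
          acc.2.2.2 ++ [bSpaces ((w : Int) - (PySem.Int.toChars total).length + 2) ++ PySem.Int.toChars total]
        else acc.2.2.2
      (tops, mids, dashes, answers)) acc
    = (acc.1 ++ L.map (fun cs => cTop (pOne cs)),
       acc.2.1 ++ L.map (fun cs => cMid (pOne cs)),
       acc.2.2.1 ++ L.map (fun cs => cDash (pOne cs)),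
       acc.2.2.2 ++ (if solve then L.map (fun cs => cAnsB (pOne cs)) else [])) := by
  induction L generalizing acc with
  | nil => simp
  | cons h t ih =>
    simp only [List.foldl_cons, List.map_cons, ih]
    cases solve <;>
      simp [cTop, cMid, cDash, cAnsB, pOne, lenI, List.append_assoc]

theorem bCols_eq (L : List (List Char)) (solve : Bool) :
    bCols L solve = (L.map (fun cs => cTop (pOne cs)),
       L.map (fun cs => cMid (pOne cs)),
       L.map (fun cs => cDash (pOne cs)),
       (if solve then L.map (fun cs => cAnsB (pOne cs)) else [])) := by
  rw [bCols, bCols_go]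
  simp

-- under the Pre_ operator condition the dict lookup is B's conditional
theorem cAnsA_eq_cAnsB (t : List Char × List Char × List Char)
    (h : t.2.1 = ['+'] ∨ t.2.1 = ['-']) : cAnsA t = cAnsB t := by
  rcases h with h | h <;> rw [cAnsA, cAnsB, h] <;> rfl

-- the formatting stage agrees (nonempty input, every item format-ok)
theorem arrange_eq (L : List (List Char)) (solve : Bool) (hL : L ≠ [])
    (hfmt : ∀ cs ∈ L, pvItemFmtOk cs solve = true) :
    aArrange L solve =
      PySem.Chars.join ['\n']
        ([PySem.Chars.join "    ".toList (bCols L solve).1,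
          PySem.Chars.join "    ".toList (bCols L solve).2.1,
          PySem.Chars.join "    ".toList (bCols L solve).2.2.1]
         ++ (if solve then [PySem.Chars.join "    ".toList (bCols L solve).2.2.2] else [])) := by
  have hsep : "    ".toList = pvSep := by decide
  have hmapne : L.map pOne ≠ [] := by simpa using hL
  rw [bCols_eq]
  simp only [aArrange]
  rw [aLine1_eq, aLine2_eq, aLine3_eq, aLine4_eq, aParse_eq]
  rw [flatMap_join cTop _ hmapne, flatMap_join cMid _ hmapne,
      flatMap_join cDash _ hmapne, flatMap_join cAnsA _ hmapne]
  simp only [List.nil_append, List.map_map, Function.comp_def]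
  simp only [slice_pair, slice_one]
  cases solve with
  | false =>
    simp only [Bool.false_eq_true, if_false, List.append_nil, hsep]
    rw [PySem.Chars.join_cons_cons, PySem.Chars.join_cons_cons, PySem.Chars.join_singleton]
    simp [List.append_assoc]
  | true =>
    have hans : L.map (fun cs => cAnsA (pOne cs)) = L.map (fun cs => cAnsB (pOne cs)) := by
      apply List.map_congr_left
      intro cs hcs
      apply cAnsA_eq_cAnsB
      have h := hfmt cs hcs
      unfold pvItemFmtOk at h
      simp only [Bool.and_eq_true, Bool.or_eq_true, beq_iff_eq] at h
      simp only [pOne]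
      tauto
    simp only [if_true, hsep, hans]
    simp [PySem.Chars.join_cons_cons, PySem.Chars.join_singleton, List.append_assoc]

-- ===== VERDICT (by name: the statement is the Claim_ definition above) =====
theorem arithmetic_arranger_spec : Claim_equal_arithmetic_arranger := by
  intro problems solve _hdom hpre
  unfold Spec_arithmetic_arranger
  unfold arithmetic_arranger arithmetic_arranger_alt
  by_cases h5 : problems.length > 5
  · simp [h5]
  · simp only [if_neg h5]
    rw [aCheck_eq_bValidate]
    cases hv : bValidate (problems.map String.toList) with
    | some e => rfl
    | none =>
      simp only []
      have hvalid : ∀ cs ∈ problems.map String.toList, pvItemValid cs = true :=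
        (bValidate_none_iff _).1 hv
      have hdw : (problems.map String.toList).dropWhile pvItemValid = [] :=
        List.dropWhile_eq_nil_iff.2 (fun x hx => hvalid x hx)
      have hfmt : ∀ cs ∈ problems.map String.toList, pvItemFmtOk cs solve = true := by
        rcases hpre with hpre | hpre
        · exact absurd hpre h5
        · rw [pvPreB, hdw] at hpre
          simpa [List.all_eq_true] using hpre
      cases problems with
      | nil => cases solve <;> rfl
      | cons p ps =>
        rw [if_neg (by simp)]
        rw [arrange_eq _ _ (by simp) hfmt]
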